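-- pv_equiv track=rewrite | github.com/ossirytk/light-chat | scripts/rag/manage_collections.py | _first_match_rank
-- ===== SOURCE A (Python) =====
-- def _clean_expected_snippets(expected_snippets: list[str]) -> list[str]:
--     cleaned: list[str] = []
--     seen: set[str] = set()
--     for snippet in expected_snippets:
--         if not isinstance(snippet, str):
--             continue
--         normalized = snippet.strip()
--         if not normalized:
--             continue
--         key = normalized.lower()
--         if key in seen:
--             continue
--         seen.add(key)
--         cleaned.append(normalized)
--     return cleaned
--
-- def _first_match_rank(results: list[str], expected_snippets: list[str]) -> int | None:
--     cleaned_snippets = _clean_expected_snippets(expected_snippets)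
--     if not cleaned_snippets:
--         return None
--     for index, chunk in enumerate(results, start=1):
--         if any(snippet in chunk for snippet in cleaned_snippets):
--             return index
--     return None
-- ===== SOURCE B (Python) =====
-- def _first_rank(snippet, results, bound):
--     for rank, chunk in enumerate(results, start=1):
--         if bound is not None and rank >= bound:
--             return None
--         if snippet in chunk:
--             return rank
--     return None
--
--
-- def _first_match_rank(results: list[str], expected_snippets: list[str]) -> int | None:
--     by_key = {}
--     for snippet in expected_snippets:
--         if not isinstance(snippet, str):
--             continue
--         normalized = snippet.strip()
--         if normalized:
--             by_key.setdefault(normalized.lower(), normalized)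
--     snippets = list(by_key.values())
--     if not snippets:
--         return None
--     best = None
--     for snippet in snippets:
--         rank = _first_rank(snippet, results, best)
--         if rank is not None:
--             best = rank
--     return best
-- ===== Notes on version B (the rewrite author's own statement) =====
-- stated objective: alternative
-- what changed: B dedupes snippets via a dict keyed by the lowercased form (setdefault) instead of a seen-set plus list, and inverts the search: instead of scanning chunks and asking whether any snippet occurs, it computes for each snippet the rank of its first containing chunk (scanning only ranks below the current best) and returns the minimum of those ranks.
import Mathlib
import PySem

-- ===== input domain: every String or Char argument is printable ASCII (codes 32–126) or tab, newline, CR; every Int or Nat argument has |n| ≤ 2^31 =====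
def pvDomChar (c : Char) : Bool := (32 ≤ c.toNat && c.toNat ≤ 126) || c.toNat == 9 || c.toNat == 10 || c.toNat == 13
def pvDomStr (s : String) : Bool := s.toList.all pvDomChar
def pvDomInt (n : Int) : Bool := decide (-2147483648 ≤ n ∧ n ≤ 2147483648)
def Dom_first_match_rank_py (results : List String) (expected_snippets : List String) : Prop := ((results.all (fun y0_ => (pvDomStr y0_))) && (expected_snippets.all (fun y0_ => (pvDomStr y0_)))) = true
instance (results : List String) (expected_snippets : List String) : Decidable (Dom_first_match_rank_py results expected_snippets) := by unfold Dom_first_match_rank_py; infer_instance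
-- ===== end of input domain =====

-- B: dedupes snippets through a dict keyed by the lowercased form (setdefault) and inverts the
-- search — per-snippet first matching rank (scanning only below the current best), then the
-- minimum — instead of A's per-chunk any-snippet scan.

-- ===== PORT A =====
-- A's _clean_expected_snippets: list of kept snippets + seen set of lowercased keys
def cleanSnippetsA (expected_snippets : List String) : List String :=
  (expected_snippets.foldl (fun (st : List String × PySem.Set String) snippet =>
    let normalized := PySem.Str.strip snippet
    if PySem.Str.len normalized == 0 then st
    else
      let key := PySem.Str.lower normalized
      if PySem.Set.contains st.2 key then st
      else (st.1 ++ [normalized], PySem.Set.add st.2 key)) ([], PySem.Set.empty)).1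

-- the 'for index, chunk in enumerate(results, start=1): if any(...): return index' loop
def scanA (cleaned : List String) : List (Int × String) → Option Int
  | [] => none
  | (index, chunk) :: rest =>
      if cleaned.any (fun snippet => PySem.Str.isIn snippet chunk) then some index
      else scanA cleaned rest

def first_match_rank_py (results : List String) (expected_snippets : List String) : Option Int :=
  let cleaned_snippets := cleanSnippetsA expected_snippets
  if cleaned_snippets = [] then none
  else scanA cleaned_snippets (PySem.List.enumerate results 1)

-- ===== PORT B =====
-- Source B's _first_rank: rank (1-based) of the first chunk containing snippet, scanning only ranks below bound
def firstRankB (snippet : String) (bound : Option Int) : List (Int × String) → Option Int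
  | [] => none
  | (rank, chunk) :: rest =>
      match bound with
      | some b =>
          if b ≤ rank then none
          else if PySem.Str.isIn snippet chunk then some rank
          else firstRankB snippet (some b) rest
      | none =>
          if PySem.Str.isIn snippet chunk then some rank
          else firstRankB snippet none rest

-- Source B's dedup loop: dict keyed by lowercased snippet, first occurrence wins (setdefault)
def cleanSnippetsB (expected_snippets : List String) : List String :=
  (expected_snippets.foldl (fun (d : PySem.Dict String String) snippet =>
    let normalized := PySem.Str.strip snippet
    if PySem.Str.len normalized == 0 then d
    else d.setdefault (PySem.Str.lower normalized) normalized) PySem.Dict.empty).values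

def first_match_rank_py_alt (results : List String) (expected_snippets : List String) : Option Int :=
  let snippets := cleanSnippetsB expected_snippets
  if snippets = [] then none
  else snippets.foldl (fun best snippet =>
    match firstRankB snippet best (PySem.List.enumerate results 1) with
    | some rank => some rank
    | none => best) none

-- ===== PRECONDITION & SPEC =====
def Spec_first_match_rank_py (results : List String) (expected_snippets : List String) (out : Option Int) : Prop := out = first_match_rank_py_alt results expected_snippets
instance (results : List String) (expected_snippets : List String) (out : Option Int) : Decidable (Spec_first_match_rank_py results expected_snippets out) := by unfold Spec_first_match_rank_py; infer_instance

-- ===== CLAIM (what is proved, stated in full; the proofs are below) =====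
def Claim_equal_first_match_rank_py : Prop := ∀ (results : List String) (expected_snippets : List String), Dom_first_match_rank_py results expected_snippets → Spec_first_match_rank_py results expected_snippets (first_match_rank_py results expected_snippets)

-- ===== LEMMAS AND PROOFS =====

-- the min-update B's main loop performs, phrased on the unbounded first rank
def updB (v best : Option Int) : Option Int :=
  match v, best with
  | some rank, none => some rank
  | some rank, some b => if rank < b then some rank else some b
  | none, _ => best

lemma clean_inv (l : List String) (d : PySem.Dict String String)
    (cleaned : List String) (seen : PySem.Set String)
    (hk : d.keys = seen) (hv : d.values = cleaned) :
    (l.foldl (fun d snippet =>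
        let normalized := PySem.Str.strip snippet
        if PySem.Str.len normalized == 0 then d
        else d.setdefault (PySem.Str.lower normalized) normalized) d).values =
    (l.foldl (fun (st : List String × PySem.Set String) snippet =>
        let normalized := PySem.Str.strip snippet
        if PySem.Str.len normalized == 0 then st
        else
          let key := PySem.Str.lower normalized
          if PySem.Set.contains st.2 key then st
          else (st.1 ++ [normalized], PySem.Set.add st.2 key)) (cleaned, seen)).1 := by
  induction l generalizing d cleaned seen with
  | nil => simpa using hv
  | cons s t ih =>
      simp only [List.foldl_cons]
      by_cases h0 : PySem.Str.len (PySem.Str.strip s) == 0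
      · rw [if_pos h0, if_pos h0]
        exact ih d cleaned seen hk hv
      · rw [if_neg h0, if_neg h0]
        by_cases hc : PySem.Set.contains seen (PySem.Str.lower (PySem.Str.strip s)) = true
        · have hdc : d.contains (PySem.Str.lower (PySem.Str.strip s)) = true := by
            rw [PySem.Dict.contains_iff_mem_keys, hk]
            exact (PySem.Set.contains_iff _ _).mp hc
          rw [PySem.Dict.setdefault_of_contains _ _ hdc, if_pos hc]
          exact ih d cleaned seen hk hv
        · have hdc : d.contains (PySem.Str.lower (PySem.Str.strip s)) = false := by
            cases hq : d.contains (PySem.Str.lower (PySem.Str.strip s)) with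
            | false => rfl
            | true => exact absurd ((PySem.Set.contains_iff seen _).mpr
                (hk ▸ (PySem.Dict.contains_iff_mem_keys d _).mp hq)) hc
          rw [PySem.Dict.setdefault_of_not_contains _ _ hdc, if_neg hc]
          apply ih
          · rw [PySem.Dict.keys_insert_of_not_contains _ _ hdc, hk]
            simp [PySem.Set.add]
            exact fun hm => hc ((PySem.Set.contains_iff seen _).mpr hm)
          · have := PySem.Dict.items_insert_of_not_contains (d := d)
              (k := PySem.Str.lower (PySem.Str.strip s)) (v := PySem.Str.strip s) hdc
            simp [PySem.Dict.values, this]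
            simpa [PySem.Dict.values] using hv

lemma clean_eq (expected_snippets : List String) :
    cleanSnippetsB expected_snippets = cleanSnippetsA expected_snippets := by
  unfold cleanSnippetsB cleanSnippetsA
  exact clean_inv expected_snippets PySem.Dict.empty [] PySem.Set.empty rfl rfl

lemma firstRank_ge (snippet : String) (cs : List String) (i : Int) (k : Int)
    (h : firstRankB snippet none (PySem.List.enumerate cs i) = some k) : i ≤ k := by
  induction cs generalizing i with
  | nil => simp [PySem.List.enumerate, firstRankB] at h
  | cons c t ih =>
      rw [PySem.List.enumerate_cons] at h
      unfold firstRankB at h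
      split_ifs at h with hm
      · simp at h; omega
      · have := ih (i + 1) h; omega

-- a bounded scan is the unbounded one filtered by the bound (ranks in an enumerate list increase)
lemma firstRank_bounded (snippet : String) (cs : List String) (i b : Int) :
    firstRankB snippet (some b) (PySem.List.enumerate cs i) =
      match firstRankB snippet none (PySem.List.enumerate cs i) with
      | some r => if r < b then some r else none
      | none => none := by
  induction cs generalizing i with
  | nil => simp [PySem.List.enumerate, firstRankB]
  | cons c t ih =>
      rw [PySem.List.enumerate_cons]
      show (if b ≤ i then none
            else if PySem.Str.isIn snippet c then some i
            else firstRankB snippet (some b) (PySem.List.enumerate t (i + 1))) = _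
      by_cases hb : b ≤ i
      · rw [if_pos hb]
        cases hu : firstRankB snippet none ((i, c) :: PySem.List.enumerate t (i + 1)) with
        | none => rfl
        | some r =>
            have hr : i ≤ r := by
              unfold firstRankB at hu
              split_ifs at hu with hm
              · simp at hu; omega
              · have := firstRank_ge snippet t (i + 1) r hu; omega
            simp only []
            rw [if_neg (by omega)]
      · rw [if_neg hb]
        by_cases hm : PySem.Str.isIn snippet c = true
        · have hu : firstRankB snippet none ((i, c) :: PySem.List.enumerate t (i + 1)) = some i := by
            show (if PySem.Str.isIn snippet c = true then some i else _) = some i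
            rw [if_pos hm]
          rw [if_pos hm, hu]
          simp only []
          rw [if_pos (by omega)]
        · have hu : firstRankB snippet none ((i, c) :: PySem.List.enumerate t (i + 1)) =
              firstRankB snippet none (PySem.List.enumerate t (i + 1)) := by
            show (if PySem.Str.isIn snippet c = true then some i else _) = _
            rw [if_neg hm]
          rw [if_neg hm, hu]
          exact ih (i + 1)

-- B's fold step equals the min-update on the unbounded first rank
lemma step_eq (snippet : String) (cs : List String) (i : Int) (best : Option Int) :
    (match firstRankB snippet best (PySem.List.enumerate cs i) with
     | some rank => some rank
     | none => best) =
    updB (firstRankB snippet none (PySem.List.enumerate cs i)) best := by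
  cases best with
  | none =>
      cases h : firstRankB snippet none (PySem.List.enumerate cs i) <;> simp [updB]
  | some b =>
      rw [firstRank_bounded snippet cs i b]
      cases h : firstRankB snippet none (PySem.List.enumerate cs i) with
      | none => simp [updB]
      | some r =>
          simp only [updB]
          by_cases hr : r < b
          · rw [if_pos hr, if_pos hr]
          · rw [if_neg hr, if_neg hr]

lemma fold_keeps (S : List String) (v : String → Option Int) (i : Int)
    (hv : ∀ s ∈ S, v s = none ∨ ∃ k, v s = some k ∧ i ≤ k) :
    S.foldl (fun best s => updB (v s) best) (some i) = some i := by
  induction S with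
  | nil => rfl
  | cons s t ih =>
      have hstep : updB (v s) (some i) = some i := by
        rcases hv s (by simp) with h | ⟨k, hk, hik⟩
        · simp [updB, h]
        · simp [updB, hk]; omega
      simp only [List.foldl_cons, hstep]
      exact ih (fun s hs => hv s (by simp [hs]))

lemma fold_hits (S : List String) (v : String → Option Int) (i : Int) (b : Option Int)
    (hv : ∀ s ∈ S, v s = none ∨ ∃ k, v s = some k ∧ i ≤ k)
    (hb : b = none ∨ ∃ k, b = some k ∧ i ≤ k)
    (hex : ∃ s ∈ S, v s = some i) :
    S.foldl (fun best s => updB (v s) best) b = some i := by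
  induction S generalizing b with
  | nil => simp at hex
  | cons s t ih =>
      simp only [List.foldl_cons]
      by_cases hs : v s = some i
      · have hstep : updB (v s) b = some i := by
          rcases hb with h | ⟨k, hk, hik⟩
          · simp [updB, hs, h]
          · simp [updB, hs, hk]
            omega
        rw [hstep]
        exact fold_keeps t v i (fun s hs => hv s (by simp [hs]))
      · have hex' : ∃ x ∈ t, v x = some i := by
          rcases hex with ⟨x, hx, hvx⟩
          rcases List.mem_cons.mp hx with rfl | hxt
          · exact absurd hvx hs
          · exact ⟨x, hxt, hvx⟩
        have hv' : ∀ x ∈ t, v x = none ∨ ∃ k, v x = some k ∧ i ≤ k :=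
          fun x hx => hv x (by simp [hx])
        have hb' : updB (v s) b = none ∨ ∃ k, updB (v s) b = some k ∧ i ≤ k := by
          rcases hv s (by simp) with h | ⟨k, hk, hik⟩
          · simpa [updB, h] using hb
          · rcases hb with h | ⟨m, hm, him⟩
            · right; exact ⟨k, by simp [updB, hk, h], hik⟩
            · right
              simp only [updB, hk, hm]
              split_ifs with h1
              · exact ⟨k, rfl, hik⟩
              · exact ⟨m, rfl, him⟩
        exact ih _ hv' hb' hex'

lemma search_eq (S : List String) (results : List String) (i : Int) :
    S.foldl (fun best snippet =>
        updB (firstRankB snippet none (PySem.List.enumerate results i)) best) none =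
    scanA S (PySem.List.enumerate results i) := by
  induction results generalizing i with
  | nil =>
      simp only [PySem.List.enumerate]
      have : ∀ b : Option Int, S.foldl (fun best snippet => updB (firstRankB snippet none []) best) b = b := by
        intro b; induction S generalizing b with
        | nil => rfl
        | cons s t ih => simp only [List.foldl_cons, firstRankB, updB]; exact ih b
      simpa [scanA] using this none
  | cons c t ih =>
      rw [PySem.List.enumerate_cons]
      by_cases hany : S.any (fun snippet => PySem.Str.isIn snippet c)
      · have hv : ∀ s ∈ S, firstRankB s none ((i, c) :: PySem.List.enumerate t (i + 1)) = none ∨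
            ∃ k, firstRankB s none ((i, c) :: PySem.List.enumerate t (i + 1)) = some k ∧ i ≤ k := by
          intro s _
          unfold firstRankB
          split_ifs with hm
          · exact Or.inr ⟨i, rfl, le_refl i⟩
          · cases hr : firstRankB s none (PySem.List.enumerate t (i + 1)) with
            | none => exact Or.inl rfl
            | some k => exact Or.inr ⟨k, rfl, by have := firstRank_ge s t (i + 1) k hr; omega⟩
        have hex : ∃ s ∈ S, firstRankB s none ((i, c) :: PySem.List.enumerate t (i + 1)) = some i := by
          rcases List.any_eq_true.mp hany with ⟨s, hs, hm⟩
          exact ⟨s, hs, by unfold firstRankB; rw [if_pos hm]⟩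
        rw [fold_hits S _ i none hv (Or.inl rfl) hex]
        have hscan : scanA S ((i, c) :: PySem.List.enumerate t (i + 1)) =
            if S.any (fun snippet => PySem.Str.isIn snippet c) then some i
            else scanA S (PySem.List.enumerate t (i + 1)) := rfl
        rw [hscan, if_pos hany]
      · have hcong : ∀ s ∈ S, firstRankB s none ((i, c) :: PySem.List.enumerate t (i + 1)) =
            firstRankB s none (PySem.List.enumerate t (i + 1)) := by
          intro s hs
          have hnot : PySem.Str.isIn s c = false := by
            cases hq : PySem.Str.isIn s c with
            | false => rfl
            | true => exact absurd (List.any_eq_true.mpr ⟨s, hs, hq⟩) hany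
          have hstep : firstRankB s none ((i, c) :: PySem.List.enumerate t (i + 1)) =
              if PySem.Str.isIn s c = true then some i
              else firstRankB s none (PySem.List.enumerate t (i + 1)) := rfl
          rw [hstep, hnot]
          simp
        have : S.foldl (fun best snippet =>
              updB (firstRankB snippet none ((i, c) :: PySem.List.enumerate t (i + 1))) best) none =
            S.foldl (fun best snippet =>
              updB (firstRankB snippet none (PySem.List.enumerate t (i + 1))) best) none := by
          apply PySem.List.foldl_congr_mem
          intro b s hs
          rw [hcong s hs]
        rw [this, ih (i + 1)]
        have hscan : scanA S ((i, c) :: PySem.List.enumerate t (i + 1)) =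
            if S.any (fun snippet => PySem.Str.isIn snippet c) then some i
            else scanA S (PySem.List.enumerate t (i + 1)) := rfl
        rw [hscan, if_neg hany]

-- ===== VERDICT (by name: the statement is the Claim_ definition above) =====
theorem first_match_rank_py_spec : Claim_equal_first_match_rank_py := by
  intro results expected_snippets _
  unfold Spec_first_match_rank_py first_match_rank_py first_match_rank_py_alt
  rw [clean_eq]
  by_cases h : cleanSnippetsA expected_snippets = []
  · simp [h]
  · simp only [h, ite_false]
    rw [PySem.List.foldl_congr_mem _ _
      (fun best snippet => updB (firstRankB snippet none (PySem.List.enumerate results 1)) best) _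
      (fun best s _ => step_eq s results 1 best)]
    exact (search_eq (cleanSnippetsA expected_snippets) results 1).symm
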